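-- pv_equiv track=rewrite | github.com/jso122-2/DAWN_pub_real | backend/visual/fix_all_visualizers.py | add_frame_saving_to_update
-- ===== SOURCE A (Python) =====
-- def add_frame_saving_to_update(content):
--     """Add frame saving to the update function"""
--     if 'Save frame if requested' in content:
--         return content
--
--     # Find update functions
--     lines = content.split('\n')
--     new_lines = []
--
--     for i, line in enumerate(lines):
--         new_lines.append(line)
--         # Add frame saving at the end of update functions
--         if ('return []' in line or 'return ' in line) and any('def update' in lines[j] for j in range(max(0, i-50), i)):
--             # Add frame saving code before the return
--             save_code = [
--                 "            ",
--                 "            # Save frame if requested",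
--                 "            if self.save_frames and self.frame_count % 10 == 0:  # Save every 10th frame",
--                 "                filename = f\"{self.output_dir}/{self.__class__.__name__.lower()}_frame_{self.frame_count:06d}.png\"",
--                 "                self.fig.savefig(filename, dpi=100, bbox_inches='tight', ",
--                 "                               facecolor='#0a0a0a', edgecolor='none')",
--                 "            self.frame_count += 1",
--                 "            "
--             ]
--             for save_line in reversed(save_code):
--                 new_lines.insert(-1, save_line)
--
--     return '\n'.join(new_lines)
-- ===== SOURCE B (Python) =====
-- # Single pass with a scalar last-'def update' index instead of re-scanning a
-- # 50-line window at every return line (objective: simpler one-pass decomposition).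
-- _SAVE_REV = [
--     "            ",
--     "            self.frame_count += 1",
--     "                               facecolor='#0a0a0a', edgecolor='none')",
--     "                self.fig.savefig(filename, dpi=100, bbox_inches='tight', ",
--     "                filename = f\"{self.output_dir}/{self.__class__.__name__.lower()}_frame_{self.frame_count:06d}.png\"",
--     "            if self.save_frames and self.frame_count % 10 == 0:  # Save every 10th frame",
--     "            # Save frame if requested",
--     "            ",
-- ]
--
-- def add_frame_saving_to_update(content):
--     """Add frame saving to the update function"""
--     if 'Save frame if requested' in content:
--         return content
--     out = []
--     last_update = None
--     for i, line in enumerate(content.split('\n')):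
--         if 'return ' in line and last_update is not None and last_update >= i - 50:
--             out.extend(_SAVE_REV)
--         out.append(line)
--         if 'def update' in line:
--             last_update = i
--     return '\n'.join(out)
-- ===== Notes on version B (the rewrite author's own statement) =====
-- stated objective: simpler
-- what changed: Replaces the per-return backward scan of a 50-line window (any over range(max(0,i-50),i)) by a single pass that carries the index of the most recent 'def update' line and compares it to i-50, and precomputes the inserted block (A's reversed insert(-1) sequence) as a constant extended before the return line.
import Mathlib
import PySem

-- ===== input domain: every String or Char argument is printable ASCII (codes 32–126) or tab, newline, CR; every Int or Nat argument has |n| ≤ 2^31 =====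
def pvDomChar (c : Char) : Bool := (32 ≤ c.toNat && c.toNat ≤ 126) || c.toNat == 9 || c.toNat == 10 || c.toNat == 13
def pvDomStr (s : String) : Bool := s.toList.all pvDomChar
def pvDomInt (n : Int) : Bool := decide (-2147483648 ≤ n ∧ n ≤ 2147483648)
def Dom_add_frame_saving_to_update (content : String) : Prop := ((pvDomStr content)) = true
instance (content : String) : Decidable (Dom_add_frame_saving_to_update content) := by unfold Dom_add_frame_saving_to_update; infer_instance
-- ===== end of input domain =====

-- B replaces the per-return backward 50-line window scan by a single pass carrying the
-- index of the most recent 'def update' line (objective: simpler one-pass decomposition).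

-- ===== PORT A =====
def pvSaveCode : List String := [
  "            ",
  "            # Save frame if requested",
  "            if self.save_frames and self.frame_count % 10 == 0:  # Save every 10th frame",
  "                filename = f\"{self.output_dir}/{self.__class__.__name__.lower()}_frame_{self.frame_count:06d}.png\"",
  "                self.fig.savefig(filename, dpi=100, bbox_inches='tight', ",
  "                               facecolor='#0a0a0a', edgecolor='none')",
  "            self.frame_count += 1",
  "            "]

-- loop body of A's for-loop (state: new_lines); `lines[j]` ported as pyGetD with default ""
-- (exact here: j ranges over max(0,i-50) ≤ j < i ≤ len(lines), always in range)
def pvStepA (lines : List String) (new_lines : List String) (il : Int × String) : List String :=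
  if (PySem.Str.isIn "return []" il.2 || PySem.Str.isIn "return " il.2)
      && (PySem.List.pyRange (max 0 (il.1 - 50)) il.1 1).any
           (fun j => PySem.Str.isIn "def update" (PySem.List.pyGetD lines j "")) then
    pvSaveCode.reverse.foldl (fun l s => PySem.List.insert l (-1) s) (new_lines ++ [il.2])
  else new_lines ++ [il.2]

def add_frame_saving_to_update (content : String) : String :=
  if PySem.Str.isIn "Save frame if requested" content then content
  else
    -- sep "\n" ≠ "": split? is some
    PySem.Str.join "\n" ((PySem.List.enumerate ((PySem.Str.split? content "\n").getD []) 0).foldl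
      (pvStepA ((PySem.Str.split? content "\n").getD [])) [])

-- ===== PORT B =====
-- _SAVE_REV of Source B
def pvSaveRev : List String := [
  "            ",
  "            self.frame_count += 1",
  "                               facecolor='#0a0a0a', edgecolor='none')",
  "                self.fig.savefig(filename, dpi=100, bbox_inches='tight', ",
  "                filename = f\"{self.output_dir}/{self.__class__.__name__.lower()}_frame_{self.frame_count:06d}.png\"",
  "            if self.save_frames and self.frame_count % 10 == 0:  # Save every 10th frame",
  "            # Save frame if requested",
  "            "]

-- loop body of B's for-loop (state: out × last_update)
-- 'last_update is not None and last_update >= i - 50' of Source B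
def pvLastOk (last : Option Int) (i : Int) : Bool :=
  match last with | some u => decide (u ≥ i - 50) | none => false

def pvStepB (st : List String × Option Int) (il : Int × String) : List String × Option Int :=
  (if PySem.Str.isIn "return " il.2 && pvLastOk st.2 il.1
   then st.1 ++ pvSaveRev ++ [il.2] else st.1 ++ [il.2],
   if PySem.Str.isIn "def update" il.2 then some il.1 else st.2)

def add_frame_saving_to_update_alt (content : String) : String :=
  if PySem.Str.isIn "Save frame if requested" content then content
  else
    PySem.Str.join "\n"
      ((PySem.List.enumerate ((PySem.Str.split? content "\n").getD []) 0).foldl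
        pvStepB ([], none)).1

-- ===== PRECONDITION & SPEC =====
def Spec_add_frame_saving_to_update (content : String) (out : String) : Prop := out = add_frame_saving_to_update_alt content
instance (content : String) (out : String) : Decidable (Spec_add_frame_saving_to_update content out) := by unfold Spec_add_frame_saving_to_update; infer_instance

-- ===== CLAIM (what is proved, stated in full; the proofs are below) =====
def Claim_equal_add_frame_saving_to_update : Prop := ∀ (content : String), Dom_add_frame_saving_to_update content → Spec_add_frame_saving_to_update content (add_frame_saving_to_update content)

-- ===== LEMMAS AND PROOFS =====

-- B's scalar state is correct: last is the most recent index < n whose line contains 'def update'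
def pvGoodLast (lines : List String) (n : Nat) (last : Option Int) : Prop :=
  match last with
  | some u => ∃ m : Nat, u = (m : Int) ∧ m < n ∧
      PySem.Str.isIn "def update" (PySem.List.pyGetD lines (m : Int) "") = true ∧
      ∀ j : Nat, m < j → j < n →
        PySem.Str.isIn "def update" (PySem.List.pyGetD lines (j : Int) "") = false
  | none => ∀ j : Nat, j < n →
      PySem.Str.isIn "def update" (PySem.List.pyGetD lines (j : Int) "") = false

lemma pvReturn_or (line : String) :
    (PySem.Str.isIn "return []" line || PySem.Str.isIn "return " line)
      = PySem.Str.isIn "return " line := by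
  by_cases h : PySem.Str.isIn "return []" line = true
  · have h2 : PySem.Str.isIn "return " line = true := by
      rw [PySem.Str.isIn_iff_infix] at h ⊢
      exact List.IsInfix.trans (by decide) h
    rw [h, h2, Bool.true_or]
  · rw [Bool.not_eq_true] at h
    rw [h, Bool.false_or]

lemma pvInsert_foldl (sc : List String) (acc : List String) (line : String) :
    sc.foldl (fun l s => PySem.List.insert l (-1) s) (acc ++ [line]) = acc ++ sc ++ [line] := by
  induction sc generalizing acc with
  | nil => simp
  | cons s sc ih =>
    have h : PySem.List.insert (acc ++ [line]) (-1) s = (acc ++ [s]) ++ [line] := by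
      simp [PySem.List.insert, PySem.List.sliceIndices]
    simp only [List.foldl_cons, h, ih (acc ++ [s])]
    simp

lemma pvCondEq (lines : List String) (n : Nat) (last : Option Int)
    (hg : pvGoodLast lines n last) :
    (PySem.List.pyRange (max 0 ((n : Int) - 50)) (n : Int) 1).any
        (fun j => PySem.Str.isIn "def update" (PySem.List.pyGetD lines j ""))
      = pvLastOk last ((n : Int)) := by
  match last with
  | none =>
    simp only [pvLastOk]
    rw [Bool.eq_false_iff]
    intro hany
    obtain ⟨j, hj, hpj⟩ := List.any_eq_true.mp hany
    rw [PySem.List.mem_pyRange_one] at hj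
    have h0 : 0 ≤ j := le_trans (le_max_left 0 _) hj.1
    have hf : PySem.Str.isIn "def update" (PySem.List.pyGetD lines ((j.toNat : Nat) : Int) "") = false := by
      apply hg; omega
    rw [Int.toNat_of_nonneg h0] at hf
    rw [hf] at hpj; exact Bool.false_ne_true hpj
  | some u =>
    obtain ⟨m, hu, hmn, hpm, hmax⟩ := hg
    subst hu
    by_cases hge : (m : Int) ≥ (n : Int) - 50
    · simp only [pvLastOk, ge_iff_le, hge, decide_true]
      apply List.any_eq_true.mpr
      refine ⟨(m : Int), ?_, hpm⟩
      rw [PySem.List.mem_pyRange_one]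
      exact ⟨max_le (Int.natCast_nonneg m) hge, by exact_mod_cast hmn⟩
    · simp only [pvLastOk, ge_iff_le, hge, decide_false]
      rw [Bool.eq_false_iff]
      intro hany
      obtain ⟨j, hj, hpj⟩ := List.any_eq_true.mp hany
      rw [PySem.List.mem_pyRange_one] at hj
      have h0 : 0 ≤ j := le_trans (le_max_left 0 _) hj.1
      have h50 : (n : Int) - 50 ≤ j := le_trans (le_max_right 0 _) hj.1
      have hf : PySem.Str.isIn "def update" (PySem.List.pyGetD lines ((j.toNat : Nat) : Int) "") = false := by
        apply hmax <;> omega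
      rw [Int.toNat_of_nonneg h0] at hf
      rw [hf] at hpj; exact Bool.false_ne_true hpj

-- the two loops agree on every suffix, given B's state invariant
lemma pvFold_eq (lines : List String) (rest : List String) (n : Nat)
    (hrest : rest = lines.drop n) (acc : List String) (last : Option Int)
    (hg : pvGoodLast lines n last) :
    (PySem.List.enumerate rest (n : Int)).foldl (pvStepA lines) acc
      = ((PySem.List.enumerate rest (n : Int)).foldl pvStepB (acc, last)).1 := by
  induction rest generalizing n acc last with
  | nil => simp [PySem.List.enumerate]
  | cons line rest ih =>
    rw [PySem.List.enumerate_cons]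
    simp only [List.foldl_cons]
    have hline : PySem.List.pyGetD lines ((n : Nat) : Int) "" = line := by
      have hsome : lines[n]? = some line := by
        have hd : (List.drop n lines)[(0 : Nat)]? = some line := by rw [← hrest]; rfl
        rw [List.getElem?_drop] at hd
        simpa using hd
      obtain ⟨hn, hv⟩ := List.getElem?_eq_some_iff.mp hsome
      rw [PySem.List.pyGetD_eq_getElem _ _ (Int.natCast_nonneg n) (by exact_mod_cast hn)]
      simpa using hv
    have hA : ((PySem.Str.isIn "return []" line || PySem.Str.isIn "return " line)
        && (PySem.List.pyRange (max 0 ((n : Int) - 50)) (n : Int) 1).any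
             (fun j => PySem.Str.isIn "def update" (PySem.List.pyGetD lines j "")))
        = (PySem.Str.isIn "return " line
        && pvLastOk last ((n : Int))) := by
      rw [pvReturn_or, pvCondEq lines n last hg]
    have hstepA : pvStepA lines acc ((n : Int), line)
        = (pvStepB (acc, last) ((n : Int), line)).1 := by
      simp only [pvStepA, pvStepB, hA]
      by_cases hc : (PySem.Str.isIn "return " line && pvLastOk last ((n : Int))) = true
      · rw [if_pos hc, if_pos hc, pvInsert_foldl]
        have hrev : pvSaveCode.reverse = pvSaveRev := by decide
        rw [hrev]
      · rw [if_neg hc, if_neg hc]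
    have hg' : pvGoodLast lines (n + 1) (pvStepB (acc, last) ((n : Int), line)).2 := by
      simp only [pvStepB]
      by_cases hp : PySem.Str.isIn "def update" line = true
      · simp only [hp, if_true]
        exact ⟨n, rfl, Nat.lt_succ_self n, by rw [hline]; exact hp, by intro j h1 h2; omega⟩
      · rw [Bool.not_eq_true] at hp
        simp only [hp, Bool.false_eq_true, if_false]
        match last with
        | none =>
          intro j hj
          rcases Nat.lt_succ_iff_lt_or_eq.mp hj with h | h
          · exact hg j h
          · subst h; rw [hline]; exact hp
        | some u =>
          obtain ⟨m, hu, hmn, hpm, hmax⟩ := hg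
          refine ⟨m, hu, by omega, hpm, ?_⟩
          intro j h1 h2
          rcases Nat.lt_succ_iff_lt_or_eq.mp h2 with h | h
          · exact hmax j h1 h
          · subst h; rw [hline]; exact hp
    have hrest' : rest = lines.drop (n + 1) := by
      rw [← List.tail_drop, ← hrest]
      rfl
    have hn1 : ((n : Int) + 1) = (((n + 1 : Nat)) : Int) := by push_cast; ring
    rw [hstepA, hn1]
    exact ih (n + 1) hrest' _ _ hg'

-- ===== VERDICT (by name: the statement is the Claim_ definition above) =====
theorem add_frame_saving_to_update_spec : Claim_equal_add_frame_saving_to_update := by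
  intro content _
  unfold Spec_add_frame_saving_to_update add_frame_saving_to_update add_frame_saving_to_update_alt
  by_cases h : PySem.Str.isIn "Save frame if requested" content = true
  · rw [if_pos h, if_pos h]
  · rw [if_neg h, if_neg h]
    have hf := pvFold_eq ((PySem.Str.split? content "\n").getD [])
      ((PySem.Str.split? content "\n").getD []) 0 (by simp) [] none (by intro j hj; omega)
    simp only [Nat.cast_zero] at hf
    rw [hf]
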